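-- pv_equiv track=rewrite | github.com/RaysonSu/adventofcode2016 | Day 2/main.py | main_part_1
-- ===== SOURCE A (Python) =====
-- OUTPUT_TYPE = str
--
-- def main_part_1(inp: list[str]) -> OUTPUT_TYPE:
--     grid: list[str] = [
--         "     ",
--         " 123 ",
--         " 456 ",
--         " 789 ",
--         "     "
--     ]
--
--     ret: str = ""
--     position: list[int] = [2, 2]
--     for row in inp:
--         for direc in row.strip():
--             pos_backup = position.copy()
--             if direc == "U":
--                 position[1] -= 1
--             elif direc == "D":
--                 position[1] += 1
--             elif direc == "L":
--                 position[0] -= 1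
--             elif direc == "R":
--                 position[0] += 1
--
--             if grid[position[1]][position[0]] == " ":
--                 position = pos_backup
--
--         ret += grid[position[1]][position[0]]
--
--     return ret
-- ===== SOURCE B (Python) =====
-- OUTPUT_TYPE = str
--
-- # Table-driven finite-state machine over the keys themselves: no coordinates,
-- # just a transition table (key, direction) -> next key; missing entries mean
-- # "stay" (edge of the keypad or a non-move character).
-- NEXT = {
--     ('1', 'D'): '4', ('1', 'R'): '2',
--     ('2', 'D'): '5', ('2', 'L'): '1', ('2', 'R'): '3',
--     ('3', 'D'): '6', ('3', 'L'): '2',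
--     ('4', 'U'): '1', ('4', 'D'): '7', ('4', 'R'): '5',
--     ('5', 'U'): '2', ('5', 'D'): '8', ('5', 'L'): '4', ('5', 'R'): '6',
--     ('6', 'U'): '3', ('6', 'D'): '9', ('6', 'L'): '5',
--     ('7', 'U'): '4', ('7', 'R'): '8',
--     ('8', 'U'): '5', ('8', 'L'): '7', ('8', 'R'): '9',
--     ('9', 'U'): '6', ('9', 'L'): '8',
-- }
--
-- def main_part_1(inp: list[str]) -> OUTPUT_TYPE:
--     key = '5'
--     out = []
--     for line in inp:
--         for d in line:
--             key = NEXT.get((key, d), key)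
--         out.append(key)
--     return "".join(out)
-- ===== Notes on version B (the rewrite author's own statement) =====
-- stated objective: alternative
-- what changed: B drops the grid-and-coordinates simulation entirely and runs a table-driven finite-state machine: the state is the current key character and a precomputed transition dict (key, direction) -> next key replaces grid indexing, bounds sentinels and backup/revert; missing entries (edges or non-move chars) mean stay, so no strip is needed.
import Mathlib
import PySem

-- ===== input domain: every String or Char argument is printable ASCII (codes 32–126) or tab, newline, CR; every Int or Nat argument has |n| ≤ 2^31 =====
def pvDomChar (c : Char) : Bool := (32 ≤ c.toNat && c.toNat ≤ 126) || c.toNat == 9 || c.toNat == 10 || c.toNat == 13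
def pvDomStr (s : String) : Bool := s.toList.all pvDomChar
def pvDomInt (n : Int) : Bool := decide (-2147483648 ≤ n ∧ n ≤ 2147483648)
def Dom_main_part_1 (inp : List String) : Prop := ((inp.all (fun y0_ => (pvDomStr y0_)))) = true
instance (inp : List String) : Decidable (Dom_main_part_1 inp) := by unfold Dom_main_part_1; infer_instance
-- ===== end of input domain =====

-- B replaces A's grid walk (coordinates, sentinel border, backup-and-revert) by a
-- table-driven finite-state machine over the key characters (objective: alternative).


-- ===== PORT A =====
def pvGridA : List String := ["     ", " 123 ", " 456 ", " 789 ", "     "]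

-- grid[y][x]; the double indexing is always in range in A (positions stay one step from
-- the interior), so the `.getD ' '` default is never reached.
def pvLookA (x y : Int) : Char :=
  ((PySem.List.pyGet? pvGridA y).bind (fun row => PySem.Str.pyGet? row x)).getD ' '

def pvStepA (p : Int × Int) (d : Char) : Int × Int :=
  let q :=
    if d = 'U' then (p.1, p.2 - 1)
    else if d = 'D' then (p.1, p.2 + 1)
    else if d = 'L' then (p.1 - 1, p.2)
    else if d = 'R' then (p.1 + 1, p.2)
    else p
  if pvLookA q.1 q.2 = ' ' then p else q

def main_part_1 (inp : List String) : String :=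
  let st := inp.foldl
    (fun (acc : String × (Int × Int)) row =>
      let pos := (PySem.Str.strip row).toList.foldl pvStepA acc.2
      (acc.1 ++ String.ofList [pvLookA pos.1 pos.2], pos))
    ("", (2, 2))
  st.1

-- ===== PORT B =====
-- the transition table NEXT: (key, direction) -> next key; missing entry = stay
def pvNEXT : PySem.Dict (Char × Char) Char := PySem.Dict.ofList [
  (('1', 'D'), '4'), (('1', 'R'), '2'),
  (('2', 'D'), '5'), (('2', 'L'), '1'), (('2', 'R'), '3'),
  (('3', 'D'), '6'), (('3', 'L'), '2'),
  (('4', 'U'), '1'), (('4', 'D'), '7'), (('4', 'R'), '5'),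
  (('5', 'U'), '2'), (('5', 'D'), '8'), (('5', 'L'), '4'), (('5', 'R'), '6'),
  (('6', 'U'), '3'), (('6', 'D'), '9'), (('6', 'L'), '5'),
  (('7', 'U'), '4'), (('7', 'R'), '8'),
  (('8', 'U'), '5'), (('8', 'L'), '7'), (('8', 'R'), '9'),
  (('9', 'U'), '6'), (('9', 'L'), '8')]

def pvStepB (k : Char) (d : Char) : Char := PySem.Dict.getD pvNEXT (k, d) k

def main_part_1_alt (inp : List String) : String :=
  let st := inp.foldl
    (fun (acc : List Char × Char) line =>
      let k := line.toList.foldl pvStepB acc.2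
      (acc.1 ++ [k], k))
    ([], '5')
  String.ofList st.1

-- ===== PRECONDITION & SPEC =====
def Spec_main_part_1 (inp : List String) (out : String) : Prop := out = main_part_1_alt inp
instance (inp : List String) (out : String) : Decidable (Spec_main_part_1 inp out) := by unfold Spec_main_part_1; infer_instance

-- ===== CLAIM (what is proved, stated in full; the proofs are below) =====
def Claim_equal_main_part_1 : Prop := ∀ (inp : List String), Dom_main_part_1 inp → Spec_main_part_1 inp (main_part_1 inp)

-- ===== LEMMAS AND PROOFS =====

-- the simulation invariant: A's (x,y) is interior and B's key is the key A stands on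
def pvInv (a : Int × Int) (k : Char) : Prop :=
  1 ≤ a.1 ∧ a.1 ≤ 3 ∧ 1 ≤ a.2 ∧ a.2 ≤ 3 ∧ k = pvLookA a.1 a.2

theorem pvStep_rel (a : Int × Int) (k : Char) (d : Char) (h : pvInv a k) :
    pvInv (pvStepA a d) (pvStepB k d) := by
  obtain ⟨x, y⟩ := a
  obtain ⟨hx1, hx3, hy1, hy3, hk⟩ := h
  by_cases hU : d = 'U'
  · subst hU hk; interval_cases x <;> interval_cases y <;> (unfold pvInv; decide)
  by_cases hD : d = 'D'
  · subst hD hk; interval_cases x <;> interval_cases y <;> (unfold pvInv; decide)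
  by_cases hL : d = 'L'
  · subst hL hk; interval_cases x <;> interval_cases y <;> (unfold pvInv; decide)
  by_cases hR : d = 'R'
  · subst hR hk; interval_cases x <;> interval_cases y <;> (unfold pvInv; decide)
  have hA : pvStepA (x, y) d = (x, y) := by simp [pvStepA, hU, hD, hL, hR]
  have hB : pvStepB k d = k := by
    have hNE : pvNEXT = PySem.Dict.mk [
      (('1', 'D'), '4'), (('1', 'R'), '2'),
      (('2', 'D'), '5'), (('2', 'L'), '1'), (('2', 'R'), '3'),
      (('3', 'D'), '6'), (('3', 'L'), '2'),
      (('4', 'U'), '1'), (('4', 'D'), '7'), (('4', 'R'), '5'),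
      (('5', 'U'), '2'), (('5', 'D'), '8'), (('5', 'L'), '4'), (('5', 'R'), '6'),
      (('6', 'U'), '3'), (('6', 'D'), '9'), (('6', 'L'), '5'),
      (('7', 'U'), '4'), (('7', 'R'), '8'),
      (('8', 'U'), '5'), (('8', 'L'), '7'), (('8', 'R'), '9'),
      (('9', 'U'), '6'), (('9', 'L'), '8')] := by decide
    simp [pvStepB, hNE, PySem.Dict.getD, PySem.Dict.get?,
      Ne.symm hU, Ne.symm hD, Ne.symm hL, Ne.symm hR]
  rw [hA, hB]
  exact ⟨hx1, hx3, hy1, hy3, hk⟩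

theorem pvStepA_space (p : Int × Int) (d : Char) (h : PySem.Chars.isspace d = true) :
    pvStepA p d = p := by
  have hU : d ≠ 'U' := by rintro rfl; simp [PySem.Chars.isspace] at h
  have hD : d ≠ 'D' := by rintro rfl; simp [PySem.Chars.isspace] at h
  have hL : d ≠ 'L' := by rintro rfl; simp [PySem.Chars.isspace] at h
  have hR : d ≠ 'R' := by rintro rfl; simp [PySem.Chars.isspace] at h
  simp [pvStepA, hU, hD, hL, hR]

theorem pvFoldA_id (cs : List Char) (p : Int × Int)
    (h : ∀ c ∈ cs, PySem.Chars.isspace c = true) :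
    cs.foldl pvStepA p = p := by
  induction cs generalizing p with
  | nil => rfl
  | cons c cs ih =>
    simp only [List.foldl_cons, pvStepA_space p c (h c (List.mem_cons_self))]
    exact ih p (fun c hc => h c (List.mem_cons_of_mem _ hc))

theorem pvFoldA_dropWhile (cs : List Char) (p : Int × Int) :
    (cs.dropWhile PySem.Chars.isspace).foldl pvStepA p = cs.foldl pvStepA p := by
  induction cs generalizing p with
  | nil => rfl
  | cons c cs ih =>
    by_cases h : PySem.Chars.isspace c = true
    · rw [List.dropWhile_cons_of_pos h, List.foldl_cons, pvStepA_space p c h]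
      exact ih p
    · rw [List.dropWhile_cons_of_neg h]

theorem pvFoldA_rstrip (cs : List Char) (p : Int × Int) :
    (PySem.Chars.rstrip cs).foldl pvStepA p = cs.foldl pvStepA p := by
  have hsplit : cs = PySem.Chars.rstrip cs ++ (cs.reverse.takeWhile PySem.Chars.isspace).reverse := by
    unfold PySem.Chars.rstrip
    rw [← List.reverse_append, List.takeWhile_append_dropWhile, List.reverse_reverse]
  conv_rhs => rw [hsplit]
  rw [List.foldl_append]
  exact (pvFoldA_id _ _ (fun c hc => List.mem_takeWhile_imp (List.mem_reverse.mp hc))).symm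

theorem pvFoldA_strip (cs : List Char) (p : Int × Int) :
    (PySem.Chars.strip cs).foldl pvStepA p = cs.foldl pvStepA p := by
  unfold PySem.Chars.strip PySem.Chars.lstrip
  rw [pvFoldA_rstrip, pvFoldA_dropWhile]

theorem pvFold_rel (cs : List Char) (a : Int × Int) (k : Char) (h : pvInv a k) :
    pvInv (cs.foldl pvStepA a) (cs.foldl pvStepB k) := by
  induction cs generalizing a k with
  | nil => exact h
  | cons c cs ih => exact ih _ _ (pvStep_rel a k c h)

theorem pvMain_rel (inp : List String) (ret : List Char) (a : Int × Int) (k : Char)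
    (h : pvInv a k) :
    (inp.foldl
      (fun (acc : String × (Int × Int)) row =>
        let pos := (PySem.Str.strip row).toList.foldl pvStepA acc.2
        (acc.1 ++ String.ofList [pvLookA pos.1 pos.2], pos)) (String.ofList ret, a)).1
    = String.ofList ((inp.foldl
      (fun (acc : List Char × Char) line =>
        let k := line.toList.foldl pvStepB acc.2
        (acc.1 ++ [k], k)) (ret, k)).1) := by
  induction inp generalizing ret a k with
  | nil => rfl
  | cons row rest ih =>
    simp only [List.foldl_cons]
    have hstrip : (PySem.Str.strip row).toList = PySem.Chars.strip row.toList := by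
      simp [PySem.Str.strip]
    rw [hstrip, pvFoldA_strip]
    have hinv : pvInv (row.toList.foldl pvStepA a) (row.toList.foldl pvStepB k) :=
      pvFold_rel _ _ _ h
    have hch : pvLookA (row.toList.foldl pvStepA a).1 (row.toList.foldl pvStepA a).2
        = row.toList.foldl pvStepB k := hinv.2.2.2.2.symm
    have hmk : String.ofList ret ++ String.ofList [pvLookA (row.toList.foldl pvStepA a).1
        (row.toList.foldl pvStepA a).2]
        = String.ofList (ret ++ [row.toList.foldl pvStepB k]) := by
      rw [hch, String.ofList_append]
    simp only [hmk]
    exact ih _ _ _ hinv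

-- ===== VERDICT (by name: the statement is the Claim_ definition above) =====
theorem main_part_1_spec : Claim_equal_main_part_1 := by
  intro inp _
  unfold Spec_main_part_1 main_part_1 main_part_1_alt
  have := pvMain_rel inp [] (2, 2) '5' (by unfold pvInv; norm_num; decide)
  simpa using this
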